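-- pv_equiv track=rewrite | github.com/lhillmer/AdventOfCode2018 | day7/code.py | get_shortest_works
-- ===== SOURCE A (Python) =====
-- def get_shortest_works(workers):
--     shortest_work = 200
--     result = []
--     for w in workers:
--         if workers[w][0] != 0 and workers[w][0] < shortest_work:
--             result = [w]
--             shortest_work = workers[w][0]
--         elif workers[w][0] != 0 and workers[w][0] == shortest_work:
--             result.append(w)
--
--     return result
-- ===== SOURCE B (Python) =====
-- def get_shortest_works(workers):
--     cands = [v[0] for v in workers.values() if v[0] != 0 and v[0] <= 200]
--     if not cands:
--         return []
--     m = min(cands)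
--     return [w for w, v in workers.items() if v[0] == m]
-- ===== Notes on version B (the rewrite author's own statement) =====
-- stated objective: simpler
-- what changed: Replaces A's single running-best scan (which rebuilds/extends the result while lowering the threshold) with a compute-the-minimum-then-filter shape: one pass collects the nonzero first values <= 200 and takes their min, a second pass keeps the keys whose first value equals that min.
import Mathlib
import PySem

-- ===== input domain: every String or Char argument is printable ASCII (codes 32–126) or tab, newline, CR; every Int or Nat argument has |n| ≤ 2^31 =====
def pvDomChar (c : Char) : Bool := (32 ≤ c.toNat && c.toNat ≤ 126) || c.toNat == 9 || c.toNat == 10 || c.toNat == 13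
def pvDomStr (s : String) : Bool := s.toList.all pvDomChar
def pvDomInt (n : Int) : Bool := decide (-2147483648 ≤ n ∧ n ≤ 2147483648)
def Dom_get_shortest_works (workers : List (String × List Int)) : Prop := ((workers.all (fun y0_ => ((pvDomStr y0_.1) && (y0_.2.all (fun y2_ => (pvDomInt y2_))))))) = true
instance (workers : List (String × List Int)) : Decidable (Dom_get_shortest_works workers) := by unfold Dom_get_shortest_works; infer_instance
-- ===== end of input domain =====

-- B computes the same result by a two-pass min-then-filter shape instead of A's running-best scan (objective: simpler).

-- ===== PORT A =====
-- workers[w]: first-match lookup in the association list (dict lookup)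
def pvLookup : List (String × List Int) → String → Option (List Int)
  | [], _ => none
  | p :: rest, w => if p.1 == w then some p.2 else pvLookup rest w

-- one iteration of A's for-loop; workers[w][0] via pvLookup and pyGet? (none = KeyError/IndexError: excluded by Pre_)
def pvStepA (workers : List (String × List Int)) (st : Int × List String) (p : String × List Int) : Int × List String :=
  match pvLookup workers p.1 with
  | none => st
  | some vs =>
    match PySem.List.pyGet? vs 0 with
    | none => st
    | some v =>
      if v ≠ 0 ∧ v < st.1 then (v, [p.1])
      else if v ≠ 0 ∧ v = st.1 then (st.1, st.2 ++ [p.1])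
      else st

def get_shortest_works (workers : List (String × List Int)) : List String :=
  (workers.foldl (pvStepA workers) (200, [])).2

-- ===== PORT B =====
def get_shortest_works_alt (workers : List (String × List Int)) : List String :=
  -- cands = [v[0] for v in workers.values() if v[0] != 0 and v[0] <= 200]
  let cands := workers.foldl (fun acc p =>
    match PySem.List.pyGet? p.2 0 with
    | some v => if v ≠ 0 ∧ v ≤ 200 then acc ++ [v] else acc
    | none => acc) []
  -- if not cands: return [];  m = min(cands)
  match PySem.List.min? cands (fun v => v) with
  | none => []
  | some m =>
    -- [w for w, v in workers.items() if v[0] == m]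
    workers.foldl (fun acc p =>
      match PySem.List.pyGet? p.2 0 with
      | some v => if v = m then acc ++ [p.1] else acc
      | none => acc) []

-- ===== PRECONDITION & SPEC =====
-- Pre_ excludes (a) pairs with an empty work list, on which Python A raises IndexError, and
-- (b) duplicate keys, which a Python dict cannot contain (the assoc list represents a dict).
def Pre_get_shortest_works (workers : List (String × List Int)) : Prop :=
  workers.Pairwise (fun p q => p.1 ≠ q.1) ∧ ∀ p ∈ workers, p.2 ≠ []
instance (workers : List (String × List Int)) : Decidable (Pre_get_shortest_works workers) := by
  unfold Pre_get_shortest_works; infer_instance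
def pvWitness_get_shortest_works : (List (String × List Int)) := [("a", [1]), ("b", [2]), ("c", [1])]

def Spec_get_shortest_works (workers : List (String × List Int)) (out : List String) : Prop := out = get_shortest_works_alt workers
instance (workers : List (String × List Int)) (out : List String) : Decidable (Spec_get_shortest_works workers out) := by unfold Spec_get_shortest_works; infer_instance

-- ===== CLAIM (what is proved, stated in full; the proofs are below) =====
def Claim_equal_get_shortest_works : Prop := ∀ (workers : List (String × List Int)), Dom_get_shortest_works workers → Pre_get_shortest_works workers → Spec_get_shortest_works workers (get_shortest_works workers)

-- ===== LEMMAS AND PROOFS =====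

-- decorated element: (key, first value); under Pre_ the head exists
def pvDec (p : String × List Int) : String × Int := (p.1, (PySem.List.pyGet? p.2 0).getD 0)

-- A's loop body on decorated pairs
def pvStepV (st : Int × List String) (q : String × Int) : Int × List String :=
  if q.2 ≠ 0 ∧ q.2 < st.1 then (q.2, [q.1])
  else if q.2 ≠ 0 ∧ q.2 = st.1 then (st.1, st.2 ++ [q.1])
  else st

-- running minimum of the nonzero values, seeded with s
def pvMinv (s : Int) (q : List (String × Int)) : Int :=
  q.foldl (fun m x => if x.2 ≠ 0 then min m x.2 else m) s

def pvKeysAt (m : Int) (q : List (String × Int)) : List String :=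
  (q.filter (fun x => decide (x.2 = m ∧ x.2 ≠ 0))).map Prod.fst

theorem pvLookup_mem (l : List (String × List Int)) (p : String × List Int)
    (hnd : l.Pairwise (fun a b => a.1 ≠ b.1)) (hp : p ∈ l) : pvLookup l p.1 = some p.2 := by
  induction l with
  | nil => cases hp
  | cons q t ih =>
    rcases List.pairwise_cons.mp hnd with ⟨hq, ht⟩
    rcases List.mem_cons.mp hp with hp | hp
    · subst hp; simp [pvLookup]
    · have : q.1 ≠ p.1 := hq p hp
      simp [pvLookup, this, ih ht hp]

theorem pvHead_some (p : String × List Int) (h : p.2 ≠ []) :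
    PySem.List.pyGet? p.2 0 = some ((PySem.List.pyGet? p.2 0).getD 0) := by
  cases hv : p.2 with
  | nil => exact absurd hv h
  | cons a t => simp

theorem pvMinv_le (q : List (String × Int)) (s : Int) : pvMinv s q ≤ s := by
  induction q generalizing s with
  | nil => simp [pvMinv]
  | cons x t ih =>
    simp only [pvMinv, List.foldl_cons]
    by_cases h : x.2 ≠ 0
    · rw [if_pos h]
      exact le_trans (ih (min s x.2)) (min_le_left _ _)
    · rw [if_neg h]
      exact ih s

-- characterisation of A's loop
theorem pvFold_char (q : List (String × Int)) (s : Int) (r : List String) :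
    q.foldl pvStepV (s, r) =
      (pvMinv s q, (if pvMinv s q = s then r else []) ++ pvKeysAt (pvMinv s q) q) := by
  induction q generalizing s r with
  | nil => simp [pvMinv, pvKeysAt]
  | cons x t ih =>
    have hm : ∀ s', pvMinv s' (x :: t) =
        pvMinv (if x.2 ≠ 0 then min s' x.2 else s') t := by
      intro s'; simp [pvMinv]
    have hk : pvKeysAt (pvMinv s (x :: t)) (x :: t) =
        (if x.2 = pvMinv s (x :: t) ∧ x.2 ≠ 0 then [x.1] else []) ++ pvKeysAt (pvMinv s (x :: t)) t := by
      by_cases h : x.2 = pvMinv s (x :: t) ∧ x.2 ≠ 0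
      · have hnz : ¬ pvMinv s (x :: t) = 0 := h.1 ▸ h.2
        simp [pvKeysAt, h, hnz]
      · simp [pvKeysAt, h]
    by_cases h0 : x.2 = 0
    · -- value 0: skipped
      have hs : pvStepV (s, r) x = (s, r) := by
        simp [pvStepV, h0]
      have hmeq : pvMinv s (x :: t) = pvMinv s t := by rw [hm]; simp [h0]
      rw [List.foldl_cons, hs, ih, hk, hmeq]
      simp [h0]
    · by_cases hlt : x.2 < s
      · -- strictly smaller: reset
        have hs : pvStepV (s, r) x = (x.2, [x.1]) := by
          simp [pvStepV, h0, hlt]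
        have hmeq : pvMinv s (x :: t) = pvMinv x.2 t := by
          rw [hm]; simp [h0, min_eq_right (le_of_lt hlt)]
        have hmlt : pvMinv s (x :: t) < s := lt_of_le_of_lt (hmeq ▸ pvMinv_le t x.2) hlt
        rw [List.foldl_cons, hs, ih, hk, hmeq]
        have hne : pvMinv x.2 t ≠ s := by omega
        simp only [if_neg hne, List.nil_append]
        by_cases he : pvMinv x.2 t = x.2
        · simp [he, h0]
        · have : ¬ (x.2 = pvMinv x.2 t ∧ x.2 ≠ 0) := by
            intro hc; exact he hc.1.symm
          simp [he, this]
      · by_cases heq : x.2 = s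
        · -- equal: append
          have hs0 : ¬ s = 0 := by omega
          have hs : pvStepV (s, r) x = (s, r ++ [x.1]) := by
            simp [pvStepV, heq, hs0]
          have hmeq : pvMinv s (x :: t) = pvMinv s t := by
            rw [hm]; simp [heq]
          rw [List.foldl_cons, hs, ih, hk, hmeq]
          by_cases he : pvMinv s t = s
          · have h2 : x.2 = pvMinv s t ∧ x.2 ≠ 0 := ⟨by omega, h0⟩
            simp [he, h2, hs0]
          · have h2 : ¬ (x.2 = pvMinv s t ∧ x.2 ≠ 0) := by
              intro hc; exact he (by omega)
            simp [he, h2]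
        · -- strictly larger: skipped
          have hgt : s < x.2 := by omega
          have hs : pvStepV (s, r) x = (s, r) := by
            simp [pvStepV, hlt, heq]
          have hmeq : pvMinv s (x :: t) = pvMinv s t := by
            rw [hm]; simp [h0, min_eq_left (le_of_lt hgt)]
          rw [List.foldl_cons, hs, ih, hk, hmeq]
          have hle : pvMinv s t ≤ s := pvMinv_le t s
          have h2 : ¬ (x.2 = pvMinv s t ∧ x.2 ≠ 0) := by
            intro hc; omega
          simp [h2]

-- generic: append-if fold is a filter-map
theorem pvFold_filter {α β : Type} (l : List α) (P : α → Prop) [DecidablePred P] (f : α → β) (acc : List β) :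
    l.foldl (fun a x => if P x then a ++ [f x] else a) acc = acc ++ (l.filter (fun x => decide (P x))).map f := by
  induction l generalizing acc with
  | nil => simp
  | cons x t ih =>
    by_cases h : P x
    · simp [h, ih]
    · simp [h, ih]

-- filter after map = map after filter on the composed predicate
theorem pvFilter_map {α β : Type} (l : List α) (f : α → β) (p : β → Bool) :
    (l.map f).filter p = (l.filter (fun x => p (f x))).map f := by
  induction l with
  | nil => rfl
  | cons x t ih => by_cases h : p (f x) <;> simp [h, ih]

theorem pvFoldMin_le_init (V : List Int) (s : Int) : V.foldl min s ≤ s := by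
  induction V generalizing s with
  | nil => simp
  | cons v t ih => exact le_trans (ih (min s v)) (min_le_left _ _)

theorem pvFoldMin_le_mem (V : List Int) (s v : Int) (hv : v ∈ V) : V.foldl min s ≤ v := by
  induction V generalizing s with
  | nil => cases hv
  | cons w t ih =>
    rcases List.mem_cons.mp hv with h | h
    · subst h
      exact le_trans (pvFoldMin_le_init t (min s v)) (min_le_right _ _)
    · exact ih (min s w) h

theorem pvFoldMin_mem (V : List Int) (s : Int) : V.foldl min s = s ∨ V.foldl min s ∈ V := by
  induction V generalizing s with
  | nil => simp
  | cons v t ih =>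
    rcases ih (min s v) with h | h
    · rcases min_cases s v with ⟨he, _⟩ | ⟨he, _⟩
      · left; rw [List.foldl_cons, h, he]
      · right; rw [List.foldl_cons, h, he]; exact List.mem_cons_self
    · right; exact List.mem_cons_of_mem v h

-- pvMinv is a fold of min over the nonzero values
theorem pvMinv_eq_foldMin (q : List (String × Int)) (s : Int) :
    pvMinv s q = ((q.map Prod.snd).filter (fun v => decide (v ≠ 0))).foldl min s := by
  induction q generalizing s with
  | nil => simp [pvMinv]
  | cons x t ih =>
    have hstep : pvMinv s (x :: t) = pvMinv (if x.2 ≠ 0 then min s x.2 else s) t := by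
      simp [pvMinv]
    by_cases h : x.2 ≠ 0
    · rw [hstep, if_pos h, ih]
      simp [h]
    · rw [hstep, if_neg h, ih]
      simp only [ne_eq, not_not] at h
      simp [h]

-- ===== VERDICT (by name: the statement is the Claim_ definition above) =====
theorem get_shortest_works_spec : Claim_equal_get_shortest_works := by
  intro workers _ hpre
  rcases hpre with ⟨hnd, hne⟩
  unfold Spec_get_shortest_works
  -- A as a fold over the decorated pairs
  have hA : get_shortest_works workers = ((workers.map pvDec).foldl pvStepV (200, [])).2 := by
    unfold get_shortest_works
    rw [List.foldl_map]
    congr 1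
    apply PySem.List.foldl_congr_mem
    intro st p hp
    obtain ⟨g, hg⟩ : ∃ g, PySem.List.pyGet? p.2 0 = some g := ⟨_, pvHead_some p (hne p hp)⟩
    unfold pvStepA pvStepV pvDec
    rw [pvLookup_mem workers p hnd hp]
    simp only [hg, Option.getD_some]
  have hAval : get_shortest_works workers =
      pvKeysAt (pvMinv 200 (workers.map pvDec)) (workers.map pvDec) := by
    rw [hA, pvFold_char]
    by_cases h : pvMinv 200 (workers.map pvDec) = 200 <;> simp [h]
  -- B's first fold builds the candidate values
  have hC : (workers.foldl (fun acc p =>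
      match PySem.List.pyGet? p.2 0 with
      | some v => if v ≠ 0 ∧ v ≤ 200 then acc ++ [v] else acc
      | none => acc) []) =
      ((workers.map pvDec).map Prod.snd).filter (fun v => decide (v ≠ 0 ∧ v ≤ 200)) := by
    have h1 : (workers.foldl (fun acc p =>
        match PySem.List.pyGet? p.2 0 with
        | some v => if v ≠ 0 ∧ v ≤ 200 then acc ++ [v] else acc
        | none => acc) []) =
        (workers.map pvDec).foldl (fun acc q => if q.2 ≠ 0 ∧ q.2 ≤ 200 then acc ++ [q.2] else acc) [] := by
      rw [List.foldl_map]
      apply PySem.List.foldl_congr_mem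
      intro st p hp
      rw [pvHead_some p (hne p hp)]
      rfl
    rw [h1, pvFold_filter ((workers.map pvDec)) (fun q => q.2 ≠ 0 ∧ q.2 ≤ 200) Prod.snd [],
        List.nil_append,
        pvFilter_map (workers.map pvDec) Prod.snd (fun v => decide (v ≠ 0 ∧ v ≤ 200))]
  -- B's second fold filters keys at the minimum
  have hB2 : ∀ m, (workers.foldl (fun acc p =>
      match PySem.List.pyGet? p.2 0 with
      | some v => if v = m then acc ++ [p.1] else acc
      | none => acc) []) =
      ((workers.map pvDec).filter (fun q => decide (q.2 = m))).map Prod.fst := by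
    intro m
    have h1 : (workers.foldl (fun acc p =>
        match PySem.List.pyGet? p.2 0 with
        | some v => if v = m then acc ++ [p.1] else acc
        | none => acc) []) =
        (workers.map pvDec).foldl (fun acc q => if q.2 = m then acc ++ [q.1] else acc) [] := by
      rw [List.foldl_map]
      apply PySem.List.foldl_congr_mem
      intro st p hp
      rw [pvHead_some p (hne p hp)]
      rfl
    rw [h1, pvFold_filter ((workers.map pvDec)) (fun q => q.2 = m) Prod.fst []]
    simp
  have hmV : pvMinv 200 (workers.map pvDec) =
      (((workers.map pvDec).map Prod.snd).filter (fun v => decide (v ≠ 0))).foldl min 200 :=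
    pvMinv_eq_foldMin _ 200
  -- candidates are exactly the nonzero values that are ≤ 200
  have hCV : ((workers.map pvDec).map Prod.snd).filter (fun v => decide (v ≠ 0 ∧ v ≤ 200)) =
      (((workers.map pvDec).map Prod.snd).filter (fun v => decide (v ≠ 0))).filter
        (fun v => decide (v ≤ 200)) := by
    rw [List.filter_filter]
    congr 1
    funext v
    by_cases h1 : v = 0 <;> by_cases h2 : v ≤ 200 <;> simp [h1, h2]
  rcases hmin : PySem.List.min?
      (((workers.map pvDec).map Prod.snd).filter (fun v => decide (v ≠ 0 ∧ v ≤ 200)))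
      (fun v => v) with _ | m
  · -- no candidates: B returns []
    have halt : get_shortest_works_alt workers = [] := by
      simp only [get_shortest_works_alt]
      rw [hC, hmin]
    have hCnil : ((workers.map pvDec).map Prod.snd).filter (fun v => decide (v ≠ 0 ∧ v ≤ 200)) = [] :=
      (PySem.List.min?_eq_none_iff _ _).mp hmin
    have hall : ∀ v ∈ ((workers.map pvDec).map Prod.snd).filter (fun v => decide (v ≠ 0)), ¬ (v ≤ 200) := by
      intro v hv hle
      have hv2 := List.mem_filter.mp hv
      have : v ∈ ((workers.map pvDec).map Prod.snd).filter (fun v => decide (v ≠ 0 ∧ v ≤ 200)) := by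
        refine List.mem_filter.mpr ⟨hv2.1, ?_⟩
        have := hv2.2
        simp at this ⊢
        exact ⟨this, hle⟩
      rw [hCnil] at this; cases this
    have hm200 : pvMinv 200 (workers.map pvDec) = 200 := by
      rw [hmV]
      rcases pvFoldMin_mem (((workers.map pvDec).map Prod.snd).filter (fun v => decide (v ≠ 0))) 200 with h | h
      · exact h
      · have h1 := pvFoldMin_le_init (((workers.map pvDec).map Prod.snd).filter (fun v => decide (v ≠ 0))) 200
        exact absurd h1 (hall _ h)
    rw [hAval, halt, hm200]
    unfold pvKeysAt
    rw [List.map_eq_nil_iff, List.filter_eq_nil_iff]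
    intro q hq hc
    simp only [decide_eq_true_eq] at hc
    have hv : q.2 ∈ ((workers.map pvDec).map Prod.snd).filter (fun v => decide (v ≠ 0)) :=
      List.mem_filter.mpr ⟨List.mem_map_of_mem hq, by simp [hc.2]⟩
    exact hall q.2 hv (by omega)
  · -- candidates exist: min? = some m, and m = pvMinv
    have halt : get_shortest_works_alt workers = (workers.foldl (fun acc p =>
        match PySem.List.pyGet? p.2 0 with
        | some v => if v = m then acc ++ [p.1] else acc
        | none => acc) []) := by
      simp only [get_shortest_works_alt]
      rw [hC, hmin]
    have hmem : m ∈ ((workers.map pvDec).map Prod.snd).filter (fun v => decide (v ≠ 0 ∧ v ≤ 200)) :=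
      PySem.List.min?_mem hmin
    have hmemf := List.mem_filter.mp hmem
    have hm0 : m ≠ 0 := by
      have := hmemf.2; simp at this; exact this.1
    have hm200 : m ≤ 200 := by
      have := hmemf.2; simp at this; exact this.2
    have hmV' : m ∈ ((workers.map pvDec).map Prod.snd).filter (fun v => decide (v ≠ 0)) :=
      List.mem_filter.mpr ⟨hmemf.1, by simp [hm0]⟩
    have hr1le : (((workers.map pvDec).map Prod.snd).filter (fun v => decide (v ≠ 0))).foldl min 200 ≤ m :=
      pvFoldMin_le_mem _ 200 m hmV'
    have hler1 : m ≤ (((workers.map pvDec).map Prod.snd).filter (fun v => decide (v ≠ 0))).foldl min 200 := by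
      rcases pvFoldMin_mem (((workers.map pvDec).map Prod.snd).filter (fun v => decide (v ≠ 0))) 200 with h | h
      · rw [h]; exact hm200
      · have hle : (((workers.map pvDec).map Prod.snd).filter (fun v => decide (v ≠ 0))).foldl min 200 ≤ 200 :=
          pvFoldMin_le_init _ 200
        have hinC : (((workers.map pvDec).map Prod.snd).filter (fun v => decide (v ≠ 0))).foldl min 200 ∈
            ((workers.map pvDec).map Prod.snd).filter (fun v => decide (v ≠ 0 ∧ v ≤ 200)) := by
          have h2 := List.mem_filter.mp h
          refine List.mem_filter.mpr ⟨h2.1, ?_⟩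
          have h3 := of_decide_eq_true h2.2
          simp only [decide_eq_true_eq]
          exact ⟨h3, hle⟩
        have := PySem.List.min?_isMin hmin _ hinC
        simpa using this
    have hmm : m = pvMinv 200 (workers.map pvDec) := by rw [hmV]; omega
    rw [hAval, halt, hB2 m, ← hmm]
    unfold pvKeysAt
    congr 1
    apply List.filter_congr
    intro q hq
    by_cases h : q.2 = m
    · simp [h, hm0]
    · simp [h]
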